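-- pv_equiv track=rewrite | github.com/BuweiChen/ShutTheBox-solver | main.py | get_positions_with_sum
-- ===== SOURCE A (Python) =====
-- import itertools
--
-- def get_positions_with_sum(total_sum):
--     """Generate all positions where the remaining open tiles sum to total_sum.
--
--     Args:
--         total_sum (int): Total sum of open tiles.
--
--     Returns:
--         list: List of positions, where a position is a list of ints sorted in increasing order
--               representing a position where the open tiles sum to total_sum.
--     """
--     if total_sum == 0:
--         return [[]]
--     positions = []
--     # Generate all possible subsets of open tiles
--     for r in range(1, 10):  # Maximum possible number of tiles is 9
--         for subset in itertools.combinations(range(1, 10), r):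
--             # Check if the sum of the subset equals the total_sum
--             if sum(subset) == total_sum:
--                 positions.append(sorted(subset))
--     return positions
-- ===== SOURCE B (Python) =====
-- def _go(tiles, remaining, current):
--     """Backtracking: all subsets of tiles (in order) summing to remaining, prefixed by current."""
--     if remaining == 0:
--         return [current]
--     if remaining < 0 or not tiles:
--         return []
--     first, rest = tiles[0], tiles[1:]
--     return _go(rest, remaining - first, current + [first]) + _go(rest, remaining, current)
--
-- def get_positions_with_sum(total_sum):
--     results = _go(list(range(1, 10)), total_sum, [])
--     return sorted(results, key=lambda p: (len(p), p))
-- ===== Notes on version B (the rewrite author's own statement) =====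
-- stated objective: alternative
-- what changed: Replaced the exhaustive enumeration of all combinations of 1..9 by size with pruned recursive include/exclude backtracking on the remaining target, followed by a (len, subset) sort restoring A's output order.
import Mathlib
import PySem

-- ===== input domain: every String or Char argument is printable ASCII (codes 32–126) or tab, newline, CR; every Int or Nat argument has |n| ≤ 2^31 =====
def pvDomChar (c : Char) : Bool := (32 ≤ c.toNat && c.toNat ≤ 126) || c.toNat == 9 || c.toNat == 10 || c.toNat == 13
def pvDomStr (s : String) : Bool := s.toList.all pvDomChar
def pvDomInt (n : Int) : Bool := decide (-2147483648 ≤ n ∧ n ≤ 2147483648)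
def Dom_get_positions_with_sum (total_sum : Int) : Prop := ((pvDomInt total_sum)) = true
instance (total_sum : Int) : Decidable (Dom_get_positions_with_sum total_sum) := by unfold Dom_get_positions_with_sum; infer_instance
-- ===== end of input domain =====

-- B replaces A's enumeration of all 2^9 combinations with pruned recursive
-- backtracking over the tiles followed by a (len, subset) sort (alternative decomposition).


-- ===== PORT A =====
def get_positions_with_sum (total_sum : Int) : List (List Int) :=
  if total_sum == 0 then [[]]
  else
    -- for r in range(1, 10): for subset in itertools.combinations(range(1,10), r): …
    (PySem.List.pyRange 1 10 1).foldl (fun positions r =>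
      (PySem.List.combinations (PySem.List.pyRange 1 10 1) r.toNat).foldl
        (fun positions subset =>
          if subset.sum == total_sum then positions ++ [PySem.List.sorted subset (fun x => x)]
          else positions)
        positions)
      []

-- ===== PORT B =====
-- backtracking helper _go(tiles, remaining, current) from Source B
def pvGo : List Int → Int → List Int → List (List Int)
  | tiles, remaining, current =>
    if remaining == 0 then [current]
    else if remaining < 0 then []
    else
      match tiles with
      | [] => []
      | first :: rest =>
          pvGo rest (remaining - first) (current ++ [first]) ++ pvGo rest remaining current
termination_by structural tiles => tiles

def get_positions_with_sum_alt (total_sum : Int) : List (List Int) :=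
  PySem.List.sorted2 (pvGo (PySem.List.pyRange 1 10 1) total_sum [])
    (fun p => (p.length : Int)) (fun p => p)

-- ===== PRECONDITION & SPEC =====
def Spec_get_positions_with_sum (total_sum : Int) (out : List (List Int)) : Prop := out = get_positions_with_sum_alt total_sum
instance (total_sum : Int) (out : List (List Int)) : Decidable (Spec_get_positions_with_sum total_sum out) := by unfold Spec_get_positions_with_sum; infer_instance

-- ===== CLAIM (what is proved, stated in full; the proofs are below) =====
def Claim_equal_get_positions_with_sum : Prop := ∀ (total_sum : Int), Dom_get_positions_with_sum total_sum → Spec_get_positions_with_sum total_sum (get_positions_with_sum total_sum)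

-- ===== LEMMAS AND PROOFS =====

-- Every tile list entry is in 1..9, so a subset's sum lies in [0, 45].
lemma pvSum_bounds (c : List Int) (h : c.Sublist (PySem.List.pyRange 1 10 1)) :
    0 ≤ c.sum ∧ c.sum ≤ 45 := by
  have hmem : ∀ x ∈ c, (0:Int) ≤ x := by
    intro x hx
    have := h.subset hx
    simp [PySem.List.pyRange] at this
    omega
  refine ⟨List.sum_nonneg hmem, ?_⟩
  have h45 : (PySem.List.pyRange 1 10 1).sum = (45:Int) := by decide
  have := List.Sublist.sum_le_sum h (by
    intro x hx; simp [PySem.List.pyRange] at hx; omega)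
  omega

lemma pvA_empty (t : Int) (ht : t < 0 ∨ 45 < t) : get_positions_with_sum t = [] := by
  have ht0 : ¬ (t == 0) = true := by simp; omega
  unfold get_positions_with_sum
  rw [if_neg ht0]
  have : ∀ (r : Int) (acc : List (List Int)),
      (PySem.List.combinations (PySem.List.pyRange 1 10 1) r.toNat).foldl
        (fun positions subset =>
          if subset.sum == t then positions ++ [PySem.List.sorted subset (fun x => x)]
          else positions) acc = acc := by
    intro r acc
    rw [PySem.List.foldl_append_if]
    have : (PySem.List.combinations (PySem.List.pyRange 1 10 1) r.toNat).filter
        (fun subset => subset.sum == t) = [] := by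
      rw [List.filter_eq_nil_iff]
      intro c hc
      have hs := (PySem.List.sublist_of_mem_combinations hc)
      have := pvSum_bounds c hs
      simp; omega
    rw [this]; simp
  exact List.foldl_fixed' (fun r => this r []) _

lemma pvGo_empty (tiles : List Int) (hnn : ∀ x ∈ tiles, 0 ≤ x) :
    ∀ (rem : Int) (cur : List Int), tiles.sum < rem → pvGo tiles rem cur = [] := by
  induction tiles with
  | nil =>
      intro rem cur h
      simp at h
      unfold pvGo
      rw [if_neg (by simp; omega), if_neg (by simp; omega)]
  | cons x rest ih =>
      intro rem cur h
      have hx : 0 ≤ x := hnn x (by simp)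
      have hrest : ∀ y ∈ rest, (0:Int) ≤ y := fun y hy => hnn y (by simp [hy])
      have hsum : 0 ≤ rest.sum := List.sum_nonneg hrest
      simp at h
      unfold pvGo
      rw [if_neg (by simp; omega), if_neg (by simp; omega)]
      show pvGo rest (rem - x) (cur ++ [x]) ++ pvGo rest rem cur = []
      rw [ih hrest (rem - x) _ (by omega), ih hrest rem _ (by omega)]
      rfl

lemma pvB_empty (t : Int) (ht : t < 0 ∨ 45 < t) : get_positions_with_sum_alt t = [] := by
  unfold get_positions_with_sum_alt
  have hgo : pvGo (PySem.List.pyRange 1 10 1) t [] = [] := by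
    rcases ht with h | h
    · unfold pvGo
      rw [if_neg (by simp; omega), if_pos (by omega)]
    · refine pvGo_empty _ (by intro x hx; simp [PySem.List.pyRange] at hx; omega) t [] ?_
      have h45 : (PySem.List.pyRange 1 10 1).sum = (45:Int) := by decide
      omega
  rw [hgo]
  rfl

-- ===== VERDICT (by name: the statement is the Claim_ definition above) =====
set_option maxRecDepth 10000 in
set_option maxHeartbeats 4000000 in
theorem get_positions_with_sum_spec : Claim_equal_get_positions_with_sum := by
  intro t _
  unfold Spec_get_positions_with_sum
  by_cases h : 0 ≤ t ∧ t ≤ 45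
  · obtain ⟨h0, h45⟩ := h
    interval_cases t <;> decide
  · have ht : t < 0 ∨ 45 < t := by omega
    rw [pvA_empty t ht, pvB_empty t ht]
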